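-- pv_equiv track=rewrite | github.com/Berteun/adventofcode2015 | day13/day13.py | score
-- ===== SOURCE A (Python) =====
-- def score(table, p):
--     s = 0
--     for i in range(len(p)):
--         pers  = p[i]
--         left  = p[(i - 1) % len(p)]
--         right = p[(i + 1) % len(p)]
--         s += table[pers][left] + table[pers][right]
--     return s
-- ===== SOURCE B (Python) =====
-- def score(table, p):
--     # Count the multiset of directed circular-adjacency edges once, then do a
--     # single weighted table lookup per DISTINCT directed edge.
--     n = len(p)
--     cnt = {}
--     for i in range(n):
--         a, b = p[i], p[(i + 1) % n]
--         cnt[a, b] = cnt.get((a, b), 0) + 1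
--         cnt[b, a] = cnt.get((b, a), 0) + 1
--     return sum(table[a][b] * c for (a, b), c in cnt.items())
-- ===== Notes on version B (the rewrite author's own statement) =====
-- stated objective: alternative
-- what changed: B counts the circle's directed adjacency edges into a dict in one pass and then performs a single weighted table lookup per DISTINCT directed edge, instead of A's two table lookups per person via modular left/right indexing; Pre_ excludes exactly the inputs where both Pythons raise KeyError (a needed table[a][b] entry missing).
import Mathlib
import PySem

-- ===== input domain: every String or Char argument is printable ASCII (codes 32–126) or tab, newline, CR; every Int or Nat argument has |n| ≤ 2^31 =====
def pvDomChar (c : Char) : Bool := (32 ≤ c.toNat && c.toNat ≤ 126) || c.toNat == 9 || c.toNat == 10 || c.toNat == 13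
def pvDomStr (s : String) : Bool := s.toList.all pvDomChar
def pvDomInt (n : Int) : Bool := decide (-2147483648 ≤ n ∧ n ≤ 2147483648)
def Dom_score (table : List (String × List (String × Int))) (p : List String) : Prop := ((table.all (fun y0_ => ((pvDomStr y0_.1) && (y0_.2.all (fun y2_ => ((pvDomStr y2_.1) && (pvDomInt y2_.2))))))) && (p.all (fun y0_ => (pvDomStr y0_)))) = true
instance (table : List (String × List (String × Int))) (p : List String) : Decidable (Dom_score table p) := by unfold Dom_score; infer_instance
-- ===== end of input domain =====

-- B counts the circle's directed adjacency edges into a dict once and then does ONE weighted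
-- table lookup per DISTINCT directed edge, instead of A's per-person left/right lookups with
-- modular indexing; return values are proved equal.

-- first-match association-list lookup (Python dict lookup); shared dict primitive of both ports
def pvGet? {α : Type} (d : List (String × α)) (k : String) : Option α :=
  match d with
  | [] => none
  | (k', v) :: t => if k' = k then some v else pvGet? t k

-- table[a][b] as an Option (none = KeyError, excluded by Pre_)
def pvLookup? (table : List (String × List (String × Int))) (a b : String) : Option Int :=
  (pvGet? table a).bind (fun inner => pvGet? inner b)

-- total version used by both ports; default 0 is never observed under Pre_
def pvLookup (table : List (String × List (String × Int))) (a b : String) : Int :=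
  (pvLookup? table a b).getD 0

-- ===== PORT A =====
def score (table : List (String × List (String × Int))) (p : List String) : Int :=
  (PySem.List.pyRange 0 (p.length : Int) 1).foldl (fun s i =>
    let pers := PySem.List.pyGetD p i ""
    let left := PySem.List.pyGetD p (PySem.Int.mod (i - 1) (p.length : Int)) ""
    let right := PySem.List.pyGetD p (PySem.Int.mod (i + 1) (p.length : Int)) ""
    s + (pvLookup table pers left + pvLookup table pers right)) 0

-- ===== PORT B =====
def score_alt (table : List (String × List (String × Int))) (p : List String) : Int :=
  let n := (p.length : Int)
  let cnt := (PySem.List.pyRange 0 n 1).foldl (fun (d : PySem.Dict (String × String) Int) i =>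
    let a := PySem.List.pyGetD p i ""
    let b := PySem.List.pyGetD p (PySem.Int.mod (i + 1) n) ""
    let d := d.insert (a, b) (d.getD (a, b) 0 + 1)
    d.insert (b, a) (d.getD (b, a) 0 + 1)) PySem.Dict.empty
  (cnt.items.map (fun ec => pvLookup table ec.1.1 ec.1.2 * ec.2)).sum

-- ===== PRECONDITION & SPEC =====
-- Pre_ excludes exactly the inputs where the Python (A and B alike) raises KeyError:
-- some table[a][b] lookup (both directions of each circular adjacency) is missing.
def Pre_score (table : List (String × List (String × Int))) (p : List String) : Prop :=
  ∀ e ∈ p.zip (p.drop 1 ++ p.take 1),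
    (∃ q ∈ table, q.1 = e.1 ∧ ∃ r ∈ q.2, r.1 = e.2) ∧
    (∃ q ∈ table, q.1 = e.2 ∧ ∃ r ∈ q.2, r.1 = e.1)
instance (table : List (String × List (String × Int))) (p : List String) : Decidable (Pre_score table p) := by unfold Pre_score; infer_instance

def pvWitness_score : (List (String × List (String × Int))) × List String :=
  ([("A", [("A", 1), ("B", 2)]), ("B", [("A", 3)])], ["A", "B"])

def Spec_score (table : List (String × List (String × Int))) (p : List String) (out : Int) : Prop := out = score_alt table p
instance (table : List (String × List (String × Int))) (p : List String) (out : Int) : Decidable (Spec_score table p out) := by unfold Spec_score; infer_instance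

-- ===== CLAIM (what is proved, stated in full; the proofs are below) =====
def Claim_equal_score : Prop := ∀ (table : List (String × List (String × Int))) (p : List String), Dom_score table p → Pre_score table p → Spec_score table p (score table p)

-- ===== LEMMAS AND PROOFS =====

-- the circle's directed adjacency edges, one pair per index (both directions)
def pvEdges (p : List String) : List (String × String) :=
  (List.range p.length).flatMap (fun k =>
    [(p.getD k "", p.getD ((k + 1) % p.length) ""),
     (p.getD ((k + 1) % p.length) "", p.getD k "")])

-- the common middle form both ports are reduced to: one term per circular edge k → k+1
def pvEdgeTerm (table : List (String × List (String × Int))) (p : List String) (k : Nat) : Int :=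
  pvLookup table (p.getD k "") (p.getD ((k + 1) % p.length) "") +
  pvLookup table (p.getD ((k + 1) % p.length) "") (p.getD k "")

theorem pv_range_map_succ_mod (n : Nat) :
    (List.range n).map (fun k => (k + 1) % n) = (List.range n).rotate 1 := by
  cases n with
  | zero => simp
  | succ m =>
    have h1 : (List.range (m+1)).rotate 1 = List.map Nat.succ (List.range m) ++ [0] := by
      rw [List.rotate_eq_drop_append_take (by simp), List.range_succ_eq_map]
      simp
    rw [h1, List.range_succ, List.map_append]
    congr 1
    · apply List.map_congr_left
      intro k hk
      simp only [List.mem_range] at hk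
      simp [Nat.mod_eq_of_lt (by omega : k + 1 < m + 1), Nat.succ_eq_add_one]
    · simp

theorem pv_mod_inv (n k : Nat) (hk : k < n) : ((k + 1) % n + n - 1) % n = k := by
  by_cases h : k + 1 < n
  · rw [Nat.mod_eq_of_lt h]
    have he : k + 1 + n - 1 = k + n := by omega
    rw [he, Nat.add_mod_right, Nat.mod_eq_of_lt hk]
  · have hk1 : k + 1 = n := by omega
    rw [hk1, Nat.mod_self]
    have he : 0 + n - 1 = k := by omega
    rw [he, Nat.mod_eq_of_lt hk]

theorem pv_score_eq_sum (table : List (String × List (String × Int))) (p : List String) :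
    score table p =
      ((List.range p.length).map (fun k =>
        pvLookup table (p.getD k "") (p.getD ((k + p.length - 1) % p.length) "") +
        pvLookup table (p.getD k "") (p.getD ((k + 1) % p.length) ""))).sum := by
  unfold score
  rw [PySem.List.pyRange_one]
  simp only [Int.sub_zero, Int.toNat_natCast, zero_add, List.foldl_map]
  rw [PySem.List.foldl_add]
  rw [zero_add]
  congr 1
  apply List.map_congr_left
  intro k hk
  simp only [List.mem_range] at hk
  have hnz : (0:Int) < (p.length:Int) := by exact_mod_cast (by omega : 0 < p.length)
  have h1 : PySem.Int.mod ((k:Int)+1) (p.length:Int) = (((k+1) % p.length : Nat) : Int) := by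
    rw [PySem.Int.mod_eq_emod_of_pos hnz]; norm_cast
  have h2 : PySem.Int.mod ((k:Int)-1) (p.length:Int) = (((k+p.length-1) % p.length : Nat) : Int) := by
    rw [PySem.Int.mod_eq_emod_of_pos hnz]
    have he : (k:Int) - 1 = ((k+p.length-1 : Nat):Int) - (p.length:Int) := by
      push_cast [Nat.cast_sub (by omega : 1 ≤ k + p.length)]; ring
    rw [he, Int.sub_emod_right]; norm_cast
  rw [h1, h2]
  simp only [PySem.List.pyGetD_natCast]

-- A equals the per-edge middle form (rotation reindexing of the "left" terms)
theorem pv_score_eq_edge_sum (table : List (String × List (String × Int))) (p : List String) :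
    score table p = ((List.range p.length).map (pvEdgeTerm table p)).sum := by
  rw [pv_score_eq_sum]
  unfold pvEdgeTerm
  rw [PySem.List.sum_map_add_int, PySem.List.sum_map_add_int, add_comm]
  congr 1
  have hc : (List.range p.length).map
        (fun k => pvLookup table (p.getD ((k + 1) % p.length) "") (p.getD k "")) =
      (List.range p.length).map
        ((fun j => pvLookup table (p.getD j "") (p.getD ((j + p.length - 1) % p.length) "")) ∘
          (fun k => (k + 1) % p.length)) := by
    apply List.map_congr_left
    intro k hk
    simp only [List.mem_range] at hk
    simp only [Function.comp]
    rw [pv_mod_inv p.length k hk]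
  rw [hc, ← List.map_map, pv_range_map_succ_mod, List.map_rotate]
  exact ((List.rotate_perm ((List.range p.length).map (fun j => pvLookup table (p.getD j "") (p.getD ((j + p.length - 1) % p.length) ""))) 1).sum_eq).symm

-- a loop doing two counter increments per step is the increment loop over the flatMapped pairs
theorem pv_two_insert_fold {α κ : Type} [BEq κ] (l : List α) (g1 g2 : α → κ)
    (d : PySem.Dict κ Int) :
    l.foldl (fun d k => (d.insert (g1 k) (d.getD (g1 k) 0 + 1)).insert (g2 k)
      ((d.insert (g1 k) (d.getD (g1 k) 0 + 1)).getD (g2 k) 0 + 1)) d =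
    (l.flatMap (fun k => [g1 k, g2 k])).foldl (fun d x => d.insert x (d.getD x 0 + 1)) d := by
  induction l generalizing d with
  | nil => rfl
  | cons hd tl ih => simp [List.flatMap_cons, ih]

-- B's counter is Counter(edges)
theorem pv_cnt_eq (p : List String) :
    (PySem.List.pyRange 0 (p.length : Int) 1).foldl (fun (d : PySem.Dict (String × String) Int) i =>
      let a := PySem.List.pyGetD p i ""
      let b := PySem.List.pyGetD p (PySem.Int.mod (i + 1) (p.length : Int)) ""
      let d := d.insert (a, b) (d.getD (a, b) 0 + 1)
      d.insert (b, a) (d.getD (b, a) 0 + 1)) PySem.Dict.empty =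
    PySem.Dict.counter (pvEdges p) := by
  rw [PySem.List.pyRange_one]
  simp only [Int.sub_zero, Int.toNat_natCast, zero_add, List.foldl_map]
  have hstep : ∀ (acc : PySem.Dict (String × String) Int), ∀ k ∈ List.range p.length,
      (fun (d : PySem.Dict (String × String) Int) (k : Nat) =>
        let a := PySem.List.pyGetD p (k:Int) ""
        let b := PySem.List.pyGetD p (PySem.Int.mod ((k:Int) + 1) (p.length:Int)) ""
        let d := d.insert (a, b) (d.getD (a, b) 0 + 1)
        d.insert (b, a) (d.getD (b, a) 0 + 1)) acc k =
      (fun (d : PySem.Dict (String × String) Int) (k : Nat) =>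
        let a := p.getD k ""
        let b := p.getD ((k + 1) % p.length) ""
        let d := d.insert (a, b) (d.getD (a, b) 0 + 1)
        d.insert (b, a) (d.getD (b, a) 0 + 1)) acc k := by
    intro acc k hk
    simp only [List.mem_range] at hk
    have hpos : (0:Int) < (p.length:Int) := by exact_mod_cast (by omega : 0 < p.length)
    have hm : PySem.Int.mod ((k:Int)+1) (p.length:Int) = (((k+1) % p.length : Nat) : Int) := by
      rw [PySem.Int.mod_eq_emod_of_pos hpos]; norm_cast
    simp only [hm, PySem.List.pyGetD_natCast]
  rw [PySem.List.foldl_congr_mem _ _ _ _ hstep]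
  rw [pv_two_insert_fold (List.range p.length)
    (fun k => (p.getD k "", p.getD ((k + 1) % p.length) ""))
    (fun k => (p.getD ((k + 1) % p.length) "", p.getD k "")) PySem.Dict.empty]
  rw [PySem.Dict.foldl_insert_getD_add_one_eq_counter]
  rfl

-- a weighted sum over the distinct elements (multiplicity = count) is the plain sum
theorem pv_dedup_sum (l : List (String × String)) (f : String × String → Int) :
    ((PySem.Set.ofList l).map (fun k => f k * (l.count k : Int))).sum = (l.map f).sum := by
  have hnd : (PySem.Set.ofList l).Nodup := PySem.Set.nodup_ofList l
  have hfin : (PySem.Set.ofList l).toFinset = l.toFinset := by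
    ext x; simp [List.mem_toFinset, PySem.Set.mem_ofList]
  rw [← List.sum_toFinset _ hnd, hfin, Finset.sum_list_map_count l f]
  apply Finset.sum_congr rfl
  intro x _
  simp [mul_comm]
  exact Or.inl (by congr 1; exact lawful_beq_subsingleton _ _)

-- B equals the per-edge middle form
theorem pv_alt_eq_edge_sum (table : List (String × List (String × Int))) (p : List String) :
    score_alt table p = ((List.range p.length).map (pvEdgeTerm table p)).sum := by
  simp only [score_alt]
  rw [pv_cnt_eq p, PySem.Dict.items_counter, List.map_map]
  simp only [Function.comp_def]
  rw [pv_dedup_sum (pvEdges p) (fun e => pvLookup table e.1 e.2)]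
  rw [pvEdges, List.flatMap, List.map_flatten, List.sum_flatten, List.map_map, List.map_map]
  apply congrArg
  apply List.map_congr_left
  intro k _
  simp [pvEdgeTerm]

-- ===== VERDICT (by name: the statement is the Claim_ definition above) =====
theorem score_spec : Claim_equal_score := by
  intro table p _ _
  unfold Spec_score
  rw [pv_score_eq_edge_sum, pv_alt_eq_edge_sum]
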